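-- pv_equiv track=rewrite | github.com/iml1111/algorithm-study | src/level3/110옮기기.py | solution
-- ===== SOURCE A (Python) =====
-- def extract(string):
--     count, stack = 0, []
--     for ch in string:
--         if (ch == '0' and 2 <= len(stack)
--             and stack[-1] == stack[-2] == '1'):
--             del stack[-2:]
--             count += 1
--         else:
--             stack.append(ch)
--     return ''.join(stack), count
--
-- def solution(s):
--     answer = []
--     for s_i in s:
--         s_i, cnt = extract(s_i)
--         zero = s_i.rfind("0")
--         if zero == -1:
--             answer_i = "110" * cnt + s_i
--         else:
--             answer_i = s_i[:zero + 1] + "110" * cnt + s_i[zero + 1:]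
--         answer.append(answer_i)
--     return answer
-- ===== SOURCE B (Python) =====
-- def _transform(t):
--     # repeated leftmost deletion of '110' ('110' has no self-overlap, so this
--     # reaches the same normal form and count as a single stack pass)
--     cnt = 0
--     i = t.find('110')
--     while i != -1:
--         t = t[:i] + t[i + 3:]
--         cnt += 1
--         i = t.find('110')
--     z = t.rfind('0')
--     return t[:z + 1] + '110' * cnt + t[z + 1:]
--
--
-- def solution(s):
--     return [_transform(t) for t in s]
-- ===== Notes on version B (the rewrite author's own statement) =====
-- stated objective: alternative
-- what changed: Replaces the single-pass explicit stack reducer with repeated leftmost deletion of '110' (find + splice until none remains) and drops A's rfind==-1 branch by using the uniform slice insertion t[:z+1]+'110'*cnt+t[z+1:], which also covers z=-1.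
import Mathlib
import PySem

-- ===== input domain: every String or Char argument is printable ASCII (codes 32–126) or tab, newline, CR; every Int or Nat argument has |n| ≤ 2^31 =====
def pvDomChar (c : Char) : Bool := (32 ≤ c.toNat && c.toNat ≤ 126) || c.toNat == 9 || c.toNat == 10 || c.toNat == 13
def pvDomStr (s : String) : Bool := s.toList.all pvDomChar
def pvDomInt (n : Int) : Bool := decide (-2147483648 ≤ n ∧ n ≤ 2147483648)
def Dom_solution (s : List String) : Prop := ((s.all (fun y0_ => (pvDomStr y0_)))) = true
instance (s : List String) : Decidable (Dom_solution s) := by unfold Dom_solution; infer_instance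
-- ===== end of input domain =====

-- B replaces A's one-pass stack reducer by repeated leftmost deletion of '110' and a
-- branch-free slice insertion; equal residual/count because '110' has no self-overlap.

-- ===== PORT A =====
-- strings are handled as their char lists; ''.join(stack) of a char stack is the stack itself
-- port of Python's '110' * cnt (negative repeat gives '')
def pyRep110 (cnt : Int) : List Char := (List.replicate cnt.toNat ['1', '1', '0']).flatten

-- loop body of extract: state (stack, count); the chained stack[-1] == stack[-2] == '1'
-- is the conjunction of the two comparisons (both indexed under the 2 <= len guard)
def extractStep (p : List Char × Int) (ch : Char) : List Char × Int :=
  if ch = '0' ∧ 2 ≤ p.1.length ∧ PySem.List.pyGet? p.1 (-1) = some '1'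
      ∧ PySem.List.pyGet? p.1 (-2) = some '1' then
    (p.1.take (p.1.length - 2), p.2 + 1)   -- del stack[-2:]; count += 1
  else
    (p.1 ++ [ch], p.2)                     -- stack.append(ch)

def extract (string : List Char) : List Char × Int :=
  List.foldl extractStep ([], 0) string

def solution (s : List String) : List String :=
  s.foldl (fun answer s_i =>
    let r := extract s_i.toList
    let zero := PySem.Chars.rfind r.1 ['0']
    let answer_i :=
      if zero = -1 then pyRep110 r.2 ++ r.1
      else PySem.List.slice r.1 none (some (zero + 1)) ++ pyRep110 r.2
             ++ PySem.List.slice r.1 (some (zero + 1)) none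
    answer ++ [String.ofList answer_i]) []

-- ===== PORT B =====
-- the while loop of _transform: state (t, cnt); t.find('110') is PySem.Chars.find.
-- fuel only makes the recursion structural: each pass removes 3 chars, so t.length
-- fuel can never run out before the loop's own exit test fires
def bloop (fuel : Nat) (t : List Char) (cnt : Int) : List Char × Int :=
  match fuel with
  | 0 => (t, cnt)
  | fuel + 1 =>
    if PySem.Chars.find t ['1', '1', '0'] = -1 then (t, cnt)
    else
      bloop fuel
        (PySem.List.slice t none (some (PySem.Chars.find t ['1', '1', '0']))
          ++ PySem.List.slice t (some (PySem.Chars.find t ['1', '1', '0'] + 3)) none)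
        (cnt + 1)

def transformB (t : List Char) : List Char :=
  let r := bloop t.length t 0
  let z := PySem.Chars.rfind r.1 ['0']
  PySem.List.slice r.1 none (some (z + 1)) ++ pyRep110 r.2
    ++ PySem.List.slice r.1 (some (z + 1)) none

def solution_alt (s : List String) : List String :=
  s.map (fun t => String.ofList (transformB t.toList))

-- ===== PRECONDITION & SPEC =====
def Spec_solution (s : List String) (out : List String) : Prop := out = solution_alt s
instance (s : List String) (out : List String) : Decidable (Spec_solution s out) := by unfold Spec_solution; infer_instance

-- ===== CLAIM (what is proved, stated in full; the proofs are below) =====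
def Claim_equal_solution : Prop := ∀ (s : List String), Dom_solution s → Spec_solution s (solution s)

-- ===== LEMMAS AND PROOFS =====

-- pyGet? at -1 / -2 of a list ending in two given elements
theorem pyGet_snoc2_neg1 (S : List Char) (a b : Char) :
    PySem.List.pyGet? (S ++ [a, b]) (-1) = some b := by
  simp [PySem.List.pyGet?, PySem.List.pyIdx?]

theorem pyGet_snoc2_neg2 (S : List Char) (a b : Char) :
    PySem.List.pyGet? (S ++ [a, b]) (-2) = some a := by
  simp [PySem.List.pyGet?, PySem.List.pyIdx?]

-- a stack passing A's pop test ends in '1','1'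
theorem ends_11 (S : List Char) (h2 : 2 ≤ S.length)
    (hm1 : PySem.List.pyGet? S (-1) = some '1')
    (hm2 : PySem.List.pyGet? S (-2) = some '1') :
    S = S.take (S.length - 2) ++ ['1', '1'] := by
  have e1 : S[S.length - 1]? = some '1' := by
    have hn : -((S.length : Int)) ≤ -1 := by omega
    simpa [PySem.List.pyGet?, PySem.List.pyIdx?, hn] using hm1
  have e2 : S[S.length - 2]? = some '1' := by
    have hn : -((S.length : Int)) ≤ -2 := by omega
    have : (S.length : Int) - 2 = ((S.length - 2 : Nat) : Int) := by omega
    simpa [PySem.List.pyGet?, PySem.List.pyIdx?, hn, show ((-(-2:Int)).toNat) = 2 by decide]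
      using hm2
  have hlt2 : S.length - 2 < S.length := by omega
  have hlt1 : S.length - 1 < S.length := by omega
  have hd2 := List.drop_eq_getElem_cons hlt2
  have hd1 := List.drop_eq_getElem_cons hlt1
  have g2 : S[S.length - 2] = '1' := by
    have := List.getElem?_eq_getElem hlt2; rw [this] at e2; exact Option.some.inj e2
  have g1 : S[S.length - 1] = '1' := by
    have := List.getElem?_eq_getElem hlt1; rw [this] at e1; exact Option.some.inj e1
  conv_lhs => rw [← List.take_append_drop (S.length - 2) S]
  rw [hd2, show S.length - 2 + 1 = S.length - 1 by omega, hd1,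
    show S.length - 1 + 1 = S.length by omega, List.drop_length, g1, g2]

-- pushing: any char other than a popping '0' is appended
theorem extractStep_push (S : List Char) (c : Int) (ch : Char) (h : ch ≠ '0') :
    extractStep (S, c) ch = (S ++ [ch], c) := by
  unfold extractStep
  rw [if_neg]; intro hc; exact h hc.1

-- popping: '0' on a stack ending in '1','1' removes them and counts
theorem extractStep_pop (S : List Char) (c : Int) :
    extractStep (S ++ ['1', '1'], c) '0' = (S, c + 1) := by
  unfold extractStep
  rw [if_pos]
  · simp
  · refine ⟨rfl, by simp, ?_, ?_⟩
    · exact pyGet_snoc2_neg1 S '1' '1'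
    · exact pyGet_snoc2_neg2 S '1' '1'

-- the count component is a pure accumulator
theorem extractStep_count (S : List Char) (c : Int) (ch : Char) :
    extractStep (S, c) ch = ((extractStep (S, 0) ch).1, c + (extractStep (S, 0) ch).2) := by
  unfold extractStep
  split_ifs <;> simp

theorem foldl_count (t : List Char) : ∀ (S : List Char) (c : Int),
    List.foldl extractStep (S, c) t
      = ((List.foldl extractStep (S, 0) t).1, c + (List.foldl extractStep (S, 0) t).2) := by
  induction t with
  | nil => intro S c; simp
  | cons ch rest ih =>
    intro S c
    simp only [List.foldl_cons]
    rw [extractStep_count S c ch,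
      ih ((extractStep (S, 0) ch).1) (c + (extractStep (S, 0) ch).2),
      show extractStep (S, 0) ch
          = ((extractStep (S, 0) ch).1, (extractStep (S, 0) ch).2) from rfl,
      ih ((extractStep (S, 0) ch).1) ((extractStep (S, 0) ch).2)]
    simp
    omega

-- on a '110'-free string the stack pass is the identity with count 0
theorem foldl_nf (t : List Char) : ∀ (S : List Char) (c : Int),
    ¬ (['1', '1', '0'] <:+: (S ++ t)) →
    List.foldl extractStep (S, c) t = (S ++ t, c) := by
  induction t with
  | nil => intro S c _; simp
  | cons ch rest ih =>
    intro S c hni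
    simp only [List.foldl_cons]
    have hstep : extractStep (S, c) ch = (S ++ [ch], c) := by
      by_cases h0 : ch = '0'
      · subst h0
        unfold extractStep
        rw [if_neg]
        intro ⟨_, hl, h1, h2⟩
        apply hni
        refine ⟨S.take (S.length - 2), rest, ?_⟩
        rw [show S ++ '0' :: rest = (S ++ ['0']) ++ rest by simp]
        rw [ends_11 S hl h1 h2]
        simp
      · exact extractStep_push S c ch h0
    rw [hstep, ih (S ++ [ch]) c (by simpa using hni)]
    simp

-- deleting one '110' occurrence costs exactly one pop and leaves the same stack
theorem foldl_removal (u v S : List Char) (c : Int) :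
    List.foldl extractStep (S, c) (u ++ ['1', '1', '0'] ++ v)
      = ((List.foldl extractStep (S, c) (u ++ v)).1,
         (List.foldl extractStep (S, c) (u ++ v)).2 + 1) := by
  rw [List.foldl_append, List.foldl_append, List.foldl_append]
  have h110 : ∀ (p : List Char × Int),
      List.foldl extractStep p ['1', '1', '0'] = (p.1, p.2 + 1) := by
    intro p
    have e1 : extractStep (p.1, p.2) '1' = (p.1 ++ ['1'], p.2) :=
      extractStep_push _ _ _ (by decide)
    have e2 : extractStep (p.1 ++ ['1'], p.2) '1' = (p.1 ++ ['1', '1'], p.2) := by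
      rw [extractStep_push _ _ _ (by decide)]; simp
    simp only [List.foldl_cons, List.foldl_nil]
    rw [show p = (p.1, p.2) from rfl, e1, e2, extractStep_pop]
  rw [h110]
  set q := List.foldl extractStep (S, c) u with hq
  rw [foldl_count v q.1 (q.2 + 1), foldl_count v q.1 q.2]
  simp
  omega

-- t.find('110') ≠ -1 splits t around its leftmost occurrence
theorem find_decomp (t : List Char) (h : PySem.Chars.find t ['1', '1', '0'] ≠ -1) :
    t = t.take (PySem.Chars.find t ['1', '1', '0']).toNat ++ ['1', '1', '0']
        ++ t.drop ((PySem.Chars.find t ['1', '1', '0']).toNat + 3) := by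
  have h0 : 0 ≤ PySem.Chars.find t ['1', '1', '0'] := by
    have := PySem.Chars.neg_one_le_find t ['1', '1', '0']
    omega
  obtain ⟨w, hw⟩ := (PySem.Chars.find_spec h0).1
  have hdw : t.drop ((PySem.Chars.find t ['1', '1', '0']).toNat + 3) = w := by
    have := congrArg (List.drop 3) hw
    simpa [List.drop_drop, Nat.add_comm] using this.symm
  conv_lhs => rw [← List.take_append_drop (PySem.Chars.find t ['1', '1', '0']).toNat t, ← hw]
  rw [hdw]
  simp

-- B's deletion loop computes A's stack extract, count offset by the accumulator
theorem bloop_eq (fuel : Nat) : ∀ (t : List Char) (cnt : Int), t.length ≤ fuel →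
    bloop fuel t cnt = ((extract t).1, cnt + (extract t).2) := by
  induction fuel with
  | zero =>
    intro t cnt hf
    have ht : t = [] := by
      cases t with
      | nil => rfl
      | cons a l => simp at hf
    subst ht
    simp [bloop, extract]
  | succ fuel ih =>
    intro t cnt hf
    rw [bloop]
    by_cases h : PySem.Chars.find t ['1', '1', '0'] = -1
    · rw [if_pos h]
      have hni : ¬ (['1', '1', '0'] <:+: t) :=
        (PySem.Chars.find_eq_neg_one_iff t ['1', '1', '0']).mp h
      have := foldl_nf t [] 0 (by simpa using hni)
      unfold extract
      rw [this]
      simp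
    · rw [if_neg h]
      have h0 : 0 ≤ PySem.Chars.find t ['1', '1', '0'] := by
        have := PySem.Chars.neg_one_le_find t ['1', '1', '0']
        omega
      have hdec := find_decomp t h
      rw [PySem.List.slice_to t h0,
        PySem.List.slice_from t (by omega : (0:Int) ≤ PySem.Chars.find t ['1', '1', '0'] + 3),
        show ((PySem.Chars.find t ['1', '1', '0'] + 3).toNat)
            = (PySem.Chars.find t ['1', '1', '0']).toNat + 3 by omega]
      set u := t.take (PySem.Chars.find t ['1', '1', '0']).toNat with hu
      set v := t.drop ((PySem.Chars.find t ['1', '1', '0']).toNat + 3) with hv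
      have hlen : (u ++ v).length ≤ fuel := by
        have := congrArg List.length hdec
        simp [hu, hv] at *
        omega
      rw [ih (u ++ v) (cnt + 1) hlen]
      unfold extract
      conv_rhs => rw [hdec]
      rw [foldl_removal u v [] 0]
      simp
      omega

-- per-string agreement of the two pipelines
theorem transform_eq (t : List Char) :
    (if PySem.Chars.rfind (extract t).1 ['0'] = -1 then pyRep110 (extract t).2 ++ (extract t).1
     else PySem.List.slice (extract t).1 none (some (PySem.Chars.rfind (extract t).1 ['0'] + 1))
            ++ pyRep110 (extract t).2
            ++ PySem.List.slice (extract t).1 (some (PySem.Chars.rfind (extract t).1 ['0'] + 1)) none)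
      = transformB t := by
  unfold transformB
  rw [bloop_eq t.length t 0 (le_refl _)]
  simp only [zero_add]
  by_cases hz : PySem.Chars.rfind (extract t).1 ['0'] = -1
  · rw [hz]
    rw [show (-1 : Int) + 1 = 0 from rfl,
      PySem.List.slice_to (extract t).1 (le_refl (0:Int)),
      PySem.List.slice_from (extract t).1 (le_refl (0:Int))]
    simp
  · simp only [if_neg hz]

-- A's answer loop, rephrased as a map of the per-string B transform
theorem sol_foldl (s : List String) (acc : List String) :
    List.foldl
      (fun answer s_i =>
        let r := extract s_i.toList
        let zero := PySem.Chars.rfind r.1 ['0']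
        let answer_i :=
          if zero = -1 then pyRep110 r.2 ++ r.1
          else PySem.List.slice r.1 none (some (zero + 1)) ++ pyRep110 r.2
                 ++ PySem.List.slice r.1 (some (zero + 1)) none
        answer ++ [String.ofList answer_i]) acc s
      = acc ++ s.map (fun t => String.ofList (transformB t.toList)) := by
  induction s generalizing acc with
  | nil => simp
  | cons a rest ih =>
    simp only [List.foldl_cons, List.map_cons]
    rw [ih, ← transform_eq a.toList]
    simp

-- ===== VERDICT (by name: the statement is the Claim_ definition above) =====
theorem solution_spec : Claim_equal_solution := by
  intro s _
  unfold Spec_solution solution solution_alt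
  exact sol_foldl s []
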